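-- pv_equiv track=rewrite | github.com/vianho/aoc2021 | day3/day3_1.py | get_gamma_rate
-- ===== SOURCE A (Python) =====
-- def get_gamma_rate(data):
--     """
--     get the most common bit of each datapoint.
--     """
--     num_of_data = len(data)
--     num_of_bits = len(data[0])
--     gamma_rate = [0] * num_of_bits
--     for d in data:
--         for i in range(num_of_bits):
--             gamma_rate[i] += int(d[i])
--
--     gamma_rate = [1 if x > num_of_data/2 else 0 for x in gamma_rate]
--     gamma_rate = ''.join(map(str, gamma_rate))
--
--     return gamma_rate
-- ===== SOURCE B (Python) =====
-- def get_gamma_rate(data):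
--     """
--     get the most common bit of each datapoint.
--     Carry-free positional encoding: each row is read as a number in base
--     9*len(data)+1, so one integer sum accumulates every column's digit count
--     at once; the counts are then peeled back off with divmod.
--     """
--     num_of_data = len(data)
--     num_of_bits = len(data[0])
--     base = 9 * num_of_data + 1
--     total = 0
--     for d in data:
--         v = 0
--         for i in range(num_of_bits):
--             v = v * base + int(d[i])
--         total += v
--     bits = []
--     for _ in range(num_of_bits):
--         total, s = divmod(total, base)
--         bits.append('1' if 2 * s > num_of_data else '0')
--     bits.reverse()
--     return ''.join(bits)
-- ===== Notes on version B (the rewrite author's own statement) =====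
-- stated objective: alternative
-- what changed: Instead of maintaining a per-position count vector, B encodes each row as one big integer in base 9*len(data)+1 so a single integer sum accumulates all column digit counts carry-free, then recovers each count by repeated divmod and thresholds it in integers.
import Mathlib
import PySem

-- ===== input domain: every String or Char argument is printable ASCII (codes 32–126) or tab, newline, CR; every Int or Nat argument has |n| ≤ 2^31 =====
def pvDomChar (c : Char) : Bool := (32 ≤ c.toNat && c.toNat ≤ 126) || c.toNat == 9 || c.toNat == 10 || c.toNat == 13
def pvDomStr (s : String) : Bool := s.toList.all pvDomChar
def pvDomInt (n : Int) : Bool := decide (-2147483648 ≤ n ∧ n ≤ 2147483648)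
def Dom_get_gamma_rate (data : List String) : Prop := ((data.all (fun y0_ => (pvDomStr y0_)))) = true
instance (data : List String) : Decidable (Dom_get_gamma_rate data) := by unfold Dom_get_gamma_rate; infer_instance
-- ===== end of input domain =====

-- B replaces A's per-position count vector by a carry-free base-(9n+1) integer encoding:
-- one big-integer sum accumulates all column counts, recovered afterwards by repeated divmod.
-- Same result, no speed claim.

-- int(d[i]) for a single digit character (Pre_ guarantees i < len(d) and the char is a digit;
-- on digits this is exactly Python's int of the one-character string)
def pvDigit (d : String) (i : Nat) : Int := ((d.toList.getD i '0').toNat : Int) - 48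

-- ===== PORT A =====
-- row-major: a running count vector over all rows; the float test x > n/2 is ported as the
-- exact integer equivalent 2*x > n, and join(map(str, [0/1])) as the corresponding chars.
def get_gamma_rate (data : List String) : String :=
  let num_of_data : Int := data.length
  let num_of_bits : Nat := (data.headD "").toList.length
  let gamma_rate : List Int :=
    data.foldl
      (fun g d => (List.range num_of_bits).foldl
        (fun g i => g.set i (g.getD i 0 + pvDigit d i)) g)
      (List.replicate num_of_bits 0)
  String.mk (gamma_rate.map (fun x => if 2 * x > num_of_data then '1' else '0'))

-- ===== PORT B =====
-- carry-free positional encoding: each row read as a number in base 9n+1, one integer sum,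
-- then the column counts are peeled off with divmod and the bits reversed at the end.
def get_gamma_rate_alt (data : List String) : String :=
  let num_of_data : Int := data.length
  let num_of_bits : Nat := (data.headD "").toList.length
  let base : Int := 9 * num_of_data + 1
  let total : Int := data.foldl
    (fun t d => t + (List.range num_of_bits).foldl (fun v i => v * base + pvDigit d i) 0) 0
  let r : Int × List Char := (List.range num_of_bits).foldl
    (fun (p : Int × List Char) _ =>
      (PySem.Int.floordiv p.1 base,
       p.2 ++ [if 2 * PySem.Int.mod p.1 base > num_of_data then '1' else '0']))
    (total, [])
  String.mk r.2.reverse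

-- ===== PRECONDITION & SPEC =====
-- Pre_ excludes exactly the inputs where Python A raises: empty data (IndexError on data[0]),
-- a row shorter than the first row (IndexError), or a non-digit character in a scanned column
-- (ValueError from int). It excludes no input on which A returns.
def Pre_get_gamma_rate (data : List String) : Prop :=
  data ≠ [] ∧ (data.all (fun d =>
    decide ((data.headD "").toList.length ≤ d.toList.length) &&
    (d.toList.take ((data.headD "").toList.length)).all Char.isDigit)) = true
instance (data : List String) : Decidable (Pre_get_gamma_rate data) := by unfold Pre_get_gamma_rate; infer_instance
def pvWitness_get_gamma_rate : List String := (["10", "11", "01"])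
def Spec_get_gamma_rate (data : List String) (out : String) : Prop := out = get_gamma_rate_alt data
instance (data : List String) (out : String) : Decidable (Spec_get_gamma_rate data out) := by unfold Spec_get_gamma_rate; infer_instance

-- ===== CLAIM (what is proved, stated in full; the proofs are below) =====
def Claim_equal_get_gamma_rate : Prop := ∀ (data : List String), Dom_get_gamma_rate data → Pre_get_gamma_rate data → Spec_get_gamma_rate data (get_gamma_rate data)

-- ===== LEMMAS AND PROOFS =====

-- column sum of column j (the value both ports' loops compute for position j)
def pvColSum (data : List String) (j : Nat) : Int :=
  data.foldl (fun s d => s + pvDigit d j) 0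

-- ---- A-side lemmas (count-vector characterisation) ----

theorem pv_inner_len (f : Nat → Int) (l : List Nat) (g : List Int) :
    (l.foldl (fun g i => g.set i (g.getD i 0 + f i)) g).length = g.length := by
  induction l generalizing g with
  | nil => rfl
  | cons i l ih => rw [List.foldl_cons, ih]; simp

theorem pv_inner_getD (f : Nat → Int) (l : List Nat) (g : List Int) (j : Nat)
    (hj : j < g.length) :
    (l.foldl (fun g i => g.set i (g.getD i 0 + f i)) g).getD j 0
      = g.getD j 0 + (l.count j : Int) * f j := by
  induction l generalizing g with
  | nil => simp
  | cons i l ih =>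
    rw [List.foldl_cons, ih _ (by simpa using hj)]
    by_cases h : i = j
    · subst h
      simp [List.getD, hj]
      ring
    · rw [List.getD_eq_getElem _ _ (by simpa using hj), List.getD_eq_getElem _ _ hj,
          List.getElem_set_ne (by omega)]
      simp [h]

theorem pv_shift (f : String → Int) (data : List String) (a : Int) :
    data.foldl (fun s d => s + f d) a = a + data.foldl (fun s d => s + f d) 0 := by
  induction data generalizing a with
  | nil => simp
  | cons d data ih =>
    rw [List.foldl_cons, List.foldl_cons, ih, ih (0 + f d)]
    ring

theorem pv_outer_len (n : Nat) (data : List String) (g : List Int) :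
    (data.foldl
      (fun g d => (List.range n).foldl (fun g i => g.set i (g.getD i 0 + pvDigit d i)) g)
      g).length = g.length := by
  induction data generalizing g with
  | nil => rfl
  | cons d data ih => rw [List.foldl_cons, ih, pv_inner_len]

theorem pv_outer_getD (n : Nat) (data : List String) (g : List Int) (j : Nat)
    (hg : g.length = n) (hj : j < n) :
    (data.foldl
      (fun g d => (List.range n).foldl (fun g i => g.set i (g.getD i 0 + pvDigit d i)) g)
      g).getD j 0
      = g.getD j 0 + pvColSum data j := by
  induction data generalizing g with
  | nil => simp [pvColSum]
  | cons d data ih =>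
    rw [List.foldl_cons, ih _ (by rw [pv_inner_len, hg]),
        pv_inner_getD _ _ _ _ (by omega), List.count_range, if_pos hj]
    unfold pvColSum
    rw [List.foldl_cons, pv_shift (fun d => pvDigit d j) data (0 + pvDigit d j)]
    push_cast
    ring

-- ---- B-side lemmas (base encoding and peeling) ----

-- the sum of row encodings up to m columns
def pvTotal (data : List String) (base : Int) (m : Nat) : Int :=
  data.foldl (fun t d => t + (List.range m).foldl (fun v i => v * base + pvDigit d i) 0) 0

theorem pv_total_zero (data : List String) (base : Int) :
    pvTotal data base 0 = 0 := by
  induction data with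
  | nil => rfl
  | cons d data ih => simp [pvTotal]

theorem pv_total_succ (data : List String) (base : Int) (m : Nat) :
    pvTotal data base (m + 1) = pvTotal data base m * base + pvColSum data m := by
  induction data with
  | nil => simp [pvTotal, pvColSum]
  | cons d data ih =>
    unfold pvTotal pvColSum at *
    simp only [List.foldl_cons]
    rw [pv_shift (fun d => (List.range (m+1)).foldl (fun v i => v * base + pvDigit d i) 0) data,
        pv_shift (fun d => (List.range m).foldl (fun v i => v * base + pvDigit d i) 0) data,
        pv_shift (fun d => pvDigit d m) data, ih,
        List.range_succ, List.foldl_append]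
    simp only [List.foldl_cons, List.foldl_nil]
    ring

-- a fold over range that ignores the index is an iterate
theorem pv_foldl_ignore {α β : Type} (f : α → α) (l : List β) (a : α) :
    l.foldl (fun a _ => f a) a = f^[l.length] a := by
  induction l generalizing a with
  | nil => rfl
  | cons b l ih => rw [List.foldl_cons, ih, List.length_cons, Function.iterate_succ_apply]

-- one divmod step peels the last column off the encoding
theorem pv_peel_step (q s base : Int) (hb : 0 < base) (h0 : 0 ≤ s) (h1 : s < base) :
    PySem.Int.floordiv (q * base + s) base = q ∧ PySem.Int.mod (q * base + s) base = s := by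
  have hq : PySem.Int.floordiv (q * base + s) base = q := by
    rw [PySem.Int.floordiv_eq_iff_of_pos hb]
    constructor <;> nlinarith
  refine ⟨hq, ?_⟩
  have := PySem.Int.floordiv_mul_add_mod (q * base + s) base
  rw [hq] at this
  omega

-- the peeling loop recovers the column bits, last column first
theorem pv_peel (data : List String) (n base : Int) (hb : 0 < base) :
    ∀ (m : Nat) (bits : List Char),
    (∀ j, j < m → 0 ≤ pvColSum data j ∧ pvColSum data j < base) →
    (fun (p : Int × List Char) =>
      (PySem.Int.floordiv p.1 base,
       p.2 ++ [if 2 * PySem.Int.mod p.1 base > n then '1' else '0']))^[m]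
      (pvTotal data base m, bits)
      = (0, bits ++ ((List.range m).map
          (fun j => if 2 * pvColSum data j > n then '1' else '0')).reverse) := by
  intro m
  induction m with
  | zero => intro bits _; simp [pv_total_zero]
  | succ m ih =>
    intro bits h
    rw [Function.iterate_succ_apply]
    have hs := h m (by omega)
    have hstep := pv_peel_step (pvTotal data base m) (pvColSum data m) base hb hs.1 hs.2
    simp only [pv_total_succ, hstep.1, hstep.2]
    rw [ih _ (fun j hj => h j (by omega))]
    rw [List.range_succ, List.map_append, List.reverse_append]
    simp

-- digits of a scanned column are in [0, 9] under Pre_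
theorem pv_digit_bounds (data : List String) (m : Nat)
    (hpre : (data.all (fun d =>
      decide (m ≤ d.toList.length) && (d.toList.take m).all Char.isDigit)) = true)
    (d : String) (hd : d ∈ data) (j : Nat) (hj : j < m) :
    0 ≤ pvDigit d j ∧ pvDigit d j ≤ 9 := by
  rw [List.all_eq_true] at hpre
  have hd' := hpre d hd
  rw [Bool.and_eq_true, decide_eq_true_eq, List.all_eq_true] at hd'
  have hjlen : j < d.toList.length := lt_of_lt_of_le hj hd'.1
  have hmem : d.toList[j] ∈ d.toList.take m :=
    List.mem_take_iff_getElem.mpr ⟨j, by omega, by simp⟩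
  have hdig := hd'.2 _ hmem
  have hbounds : 48 ≤ (d.toList[j]).toNat ∧ (d.toList[j]).toNat ≤ 57 := by
    simp only [Char.isDigit] at hdig
    rw [Bool.and_eq_true, decide_eq_true_eq, decide_eq_true_eq] at hdig
    exact ⟨hdig.1, hdig.2⟩
  unfold pvDigit
  rw [List.getD_eq_getElem _ _ hjlen]
  omega

-- column sums are in [0, 9 * number of rows]
theorem pv_colsum_bounds (data : List String) (j : Nat)
    (h : ∀ d ∈ data, 0 ≤ pvDigit d j ∧ pvDigit d j ≤ 9) :
    0 ≤ pvColSum data j ∧ pvColSum data j ≤ 9 * data.length := by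
  induction data with
  | nil => simp [pvColSum]
  | cons d data ih =>
    have hd := h d (List.mem_cons_self)
    have ih' := ih (fun d' hd' => h d' (List.mem_cons_of_mem _ hd'))
    unfold pvColSum at *
    rw [List.foldl_cons, pv_shift (fun d => pvDigit d j) data (0 + pvDigit d j)]
    simp only [List.length_cons]
    push_cast
    constructor <;> nlinarith [ih'.1, ih'.2, hd.1, hd.2]

-- ===== VERDICT (by name: the statement is the Claim_ definition above) =====
theorem get_gamma_rate_spec : Claim_equal_get_gamma_rate := by
  intro data _ hpre
  obtain ⟨hne, hall⟩ := hpre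
  simp only [Spec_get_gamma_rate, get_gamma_rate, get_gamma_rate_alt]
  set n : Int := (data.length : Int) with hn
  set m : Nat := (data.headD "").toList.length with hm
  set base : Int := 9 * n + 1 with hbase
  have hb : 0 < base := by
    have : (0 : Int) ≤ n := by positivity
    omega
  -- bounds for every scanned column
  have hS : ∀ j, j < m → 0 ≤ pvColSum data j ∧ pvColSum data j < base := by
    intro j hj
    have := pv_colsum_bounds data j (fun d hd => pv_digit_bounds data m hall d hd j hj)
    omega
  -- B side: the total is pvTotal, and peeling yields the reversed bit list
  have hpeel := pv_peel data n base hb m [] hS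
  rw [show (List.foldl (fun t d => t + List.foldl (fun v i => v * base + pvDigit d i) 0 (List.range m)) 0 data) = pvTotal data base m from rfl]
  rw [pv_foldl_ignore
    (fun (p : Int × List Char) =>
      (PySem.Int.floordiv p.1 base,
       p.2 ++ [if 2 * PySem.Int.mod p.1 base > n then '1' else '0']))
    (List.range m) ((pvTotal data base m), ([] : List Char))]
  simp only [List.length_range]
  rw [hpeel]
  simp only [List.nil_append, List.reverse_reverse]
  -- A side: the count vector's entries are the column sums
  congr 1
  set G := data.foldl
      (fun g d => (List.range m).foldl (fun g i => g.set i (g.getD i 0 + pvDigit d i)) g)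
      (List.replicate m 0) with hG
  have hlen : G.length = m := by rw [hG, pv_outer_len]; simp
  apply List.ext_getElem
  · simp [hlen]
  · intro j h1 h2
    have hj : j < m := by simpa [hlen] using h1
    simp only [List.getElem_map, List.getElem_range]
    congr 1
    have := pv_outer_getD m data (List.replicate m 0) j (by simp) hj
    rw [← hG] at this
    rw [← List.getD_eq_getElem G 0 (by omega), this]
    simp
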